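-- pv_equiv track=rewrite | github.com/jon-of-us/chord-converter | parse_file_old.py | _insert_markers
-- ===== SOURCE A (Python) =====
-- from typing import List, Tuple, Optional, Dict, Any
--
-- def _insert_markers(text: str, inserts: List[Tuple[int, str]]) -> str:
--     """Insert HTML snippets at specific character indices in text.
--     Inserts must be a list of (index, html). Later inserts won't shift earlier positions
--     if we apply from right to left.
--     """
--     if not inserts:
--         return text
--     chars = list(text)
--     # sort descending by index
--     for idx, html in sorted(inserts, key=lambda x: x[0], reverse=True):
--         idx_clamped = max(0, min(idx, len(chars)))
--         chars[idx_clamped:idx_clamped] = [html]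
--     return "".join(chars)
-- ===== SOURCE B (Python) =====
-- def _insert_markers(text, inserts):
--     """Insert HTML snippets at specific character indices in text.
--     One pass over the sorted inserts collecting text segments and markers,
--     joined once -- instead of repeated list splicing."""
--     n = len(text)
--     parts = []
--     prev = n
--     for idx, html in sorted(inserts, key=lambda x: x[0], reverse=True):
--         c = max(0, min(idx, n))
--         parts.append(text[c:prev])
--         parts.append(html)
--         prev = c
--     parts.append(text[:prev])
--     return "".join(reversed(parts))
-- ===== Notes on version B (the rewrite author's own statement) =====
-- stated objective: faster
-- what changed: Instead of splicing each marker into a list of characters (each slice assignment copies the whole list), B makes one pass over the sorted inserts collecting text segments and markers into a parts list and joins them once.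
-- outside the precondition, e.g. on _insert_markers('a', [(5, 'x'), (2, 'y')]): A returns 'axy', B returns 'ayx'
import Mathlib
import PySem

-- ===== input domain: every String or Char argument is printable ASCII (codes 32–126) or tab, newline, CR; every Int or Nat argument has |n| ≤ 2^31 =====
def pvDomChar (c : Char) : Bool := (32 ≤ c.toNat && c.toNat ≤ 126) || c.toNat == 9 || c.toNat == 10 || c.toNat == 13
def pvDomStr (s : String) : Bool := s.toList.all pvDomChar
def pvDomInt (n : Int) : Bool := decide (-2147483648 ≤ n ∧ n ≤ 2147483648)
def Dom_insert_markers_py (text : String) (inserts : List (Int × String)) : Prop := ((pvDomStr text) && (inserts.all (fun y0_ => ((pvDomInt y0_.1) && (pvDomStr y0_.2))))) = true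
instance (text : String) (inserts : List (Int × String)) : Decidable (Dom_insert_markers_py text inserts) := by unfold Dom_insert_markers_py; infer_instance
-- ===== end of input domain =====

-- B replaces A's repeated list-splicing loop by one pass over the sorted inserts that
-- collects text segments and markers and joins them once (objective: faster).

-- ===== PORT A =====
-- list(text): a list of one-character strings
def pvSing (c : Char) : String := String.ofList [c]
-- loop body: 'chars[idx_clamped:idx_clamped] = [html]' (slice assignment) is ported by hand
-- as take/drop around the clamped index; exact because 0 ≤ idx_clamped ≤ len(chars)
def pvStepA (chars : List String) (p : Int × String) : List String :=
  chars.take (max 0 (min p.1 (chars.length : Int))).toNat ++ [p.2]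
    ++ chars.drop (max 0 (min p.1 (chars.length : Int))).toNat

def insert_markers_py (text : String) (inserts : List (Int × String)) : String :=
  if inserts = [] then text
  else
    PySem.Str.join ""
      ((PySem.List.sorted inserts (fun x => x.1) true).foldl pvStepA
        (text.toList.map pvSing))

-- ===== PORT B =====
-- loop body of Source B: push text[c:prev] and html, remember prev := c
-- (n = len(text) is a constant of the loop, written out as PySem.Str.len text)
def pvStepB (text : String) (st : List String × Int) (p : Int × String) : List String × Int :=
  (st.1 ++ [PySem.Str.slice text (some (max 0 (min p.1 (PySem.Str.len text)))) (some st.2), p.2],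
   max 0 (min p.1 (PySem.Str.len text)))

def insert_markers_py_alt (text : String) (inserts : List (Int × String)) : String :=
  let st := (PySem.List.sorted inserts (fun x => x.1) true).foldl (pvStepB text)
      ([], PySem.Str.len text)
  PySem.Str.join "" ((st.1 ++ [PySem.Str.slice text none (some st.2)]).reverse)

-- ===== PRECONDITION & SPEC =====
-- Pre_ excludes inputs in which two or more inserts with DIFFERENT non-empty snippets carry an
-- index greater than len(text): all such markers are clamped past the end of the text, and their
-- relative order there is a tie that A breaks by clamping against the list as it grows during
-- the loop (an accident of the traversal, both orders defensible) while B keeps them in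
-- descending-index order.
def Pre_insert_markers_py (text : String) (inserts : List (Int × String)) : Prop :=
  ∀ p ∈ inserts, (text.toList.length : Int) < p.1 → p.2 ≠ "" →
    ∀ q ∈ inserts, (text.toList.length : Int) < q.1 → q.2 ≠ "" → p.2 = q.2
instance (text : String) (inserts : List (Int × String)) : Decidable (Pre_insert_markers_py text inserts) := by unfold Pre_insert_markers_py; infer_instance

def pvWitness_insert_markers_py : String × (List (Int × String)) := ("ab", [(1, "<b>"), (0, "<i>"), (1, "</b>")])

def Spec_insert_markers_py (text : String) (inserts : List (Int × String)) (out : String) : Prop := out = insert_markers_py_alt text inserts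
instance (text : String) (inserts : List (Int × String)) (out : String) : Decidable (Spec_insert_markers_py text inserts out) := by unfold Spec_insert_markers_py; infer_instance

-- ===== CLAIM (what is proved, stated in full; the proofs are below) =====
def Claim_equal_insert_markers_py : Prop := ∀ (text : String) (inserts : List (Int × String)), Dom_insert_markers_py text inserts → Pre_insert_markers_py text inserts → Spec_insert_markers_py text inserts (insert_markers_py text inserts)

-- ===== LEMMAS AND PROOFS =====

-- "".join on the List Char side
def pvJ (parts : List String) : List Char := PySem.Chars.join [] (parts.map String.toList)

-- the common shape of both results: markers of L (descending, all indices ≤ prev)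
-- woven into cs.take prev
def pvSpec (cs : List Char) (prev : Nat) : List (Int × String) → List Char
  | [] => cs.take prev
  | p :: rest =>
      pvSpec cs (max 0 (min p.1 (prev : Int))).toNat rest
        ++ p.2.toList
        ++ (cs.take prev).drop (max 0 (min p.1 (prev : Int))).toNat

lemma pvJ_nil : pvJ [] = [] := rfl

lemma pvJ_cons (x : String) (xs : List String) : pvJ (x :: xs) = x.toList ++ pvJ xs := by
  unfold pvJ PySem.Chars.join
  cases xs <;> simp [List.intercalate]

lemma pvJ_append (a b : List String) : pvJ (a ++ b) = pvJ a ++ pvJ b := by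
  induction a with
  | nil => simp [pvJ]
  | cons x xs ih => simp [pvJ_cons, ih]

lemma pvJ_sing (cs : List Char) : pvJ (cs.map pvSing) = cs := by
  unfold pvJ
  have : (cs.map pvSing).map String.toList = cs.map (fun c => [c]) := by
    simp [pvSing]
  rw [this, PySem.Chars.join_nil_singletons]

-- the step of A only touches the prefix when every remaining index fits in it
lemma pvFoldA_append (L : List (Int × String)) (x y : List String)
    (h : ∀ p ∈ L, p.1 ≤ (x.length : Int)) :
    L.foldl pvStepA (x ++ y) = L.foldl pvStepA x ++ y := by
  induction L generalizing x with
  | nil => simp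
  | cons p rest ih =>
      have hp := h p (by simp)
      have hstep : pvStepA (x ++ y) p = pvStepA x p ++ y := by
        unfold pvStepA
        have hc : (max 0 (min p.1 ((x ++ y).length : Int))).toNat
            = (max 0 (min p.1 (x.length : Int))).toNat := by
          simp only [List.length_append]
          omega
        rw [hc]
        have hle : (max 0 (min p.1 (x.length : Int))).toNat ≤ x.length := by omega
        rw [List.take_append_of_le_length hle, List.drop_append_of_le_length hle]
        simp
      rw [List.foldl_cons, List.foldl_cons, hstep, ih]
      intro q hq
      have : (pvStepA x p).length = x.length + 1 := by
        unfold pvStepA; simp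
      rw [this]
      have := h q (by simp [hq])
      omega

-- A's fold over a descending list, starting from a prefix of the singletons, joins to pvSpec
lemma pvFoldA_spec (cs : List Char) (L : List (Int × String)) (prev : Nat)
    (hprev : prev ≤ cs.length)
    (hs : L.Pairwise (fun a b => b.1 ≤ a.1))
    (hle : ∀ p ∈ L, p.1 ≤ (prev : Int)) :
    pvJ (L.foldl pvStepA ((cs.map pvSing).take prev)) = pvSpec cs prev L := by
  induction L generalizing prev with
  | nil =>
      simp only [List.foldl_nil, pvSpec]
      rw [← List.map_take, pvJ_sing]
  | cons p rest ih =>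
      obtain ⟨hp, hrest⟩ := List.pairwise_cons.mp hs
      have hple := hle p (by simp)
      have hlen : ((cs.map pvSing).take prev).length = prev := by
        simp; omega
      have hcle : (max 0 (min p.1 (prev : Int))).toNat ≤ prev := by omega
      have hqle : ∀ q ∈ rest, q.1 ≤ ((max 0 (min p.1 (prev : Int))).toNat : Int) := by
        intro q hq
        have h1 := hp q hq
        have h2 := hle q (by simp [hq])
        omega
      have hstep : pvStepA ((cs.map pvSing).take prev) p
          = (cs.map pvSing).take (max 0 (min p.1 (prev : Int))).toNat
            ++ ([p.2] ++ ((cs.take prev).drop (max 0 (min p.1 (prev : Int))).toNat).map pvSing) := by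
        unfold pvStepA
        rw [hlen, List.take_take, Nat.min_eq_left hcle, List.map_drop, List.map_take]
        simp [List.append_assoc]
      rw [List.foldl_cons, hstep,
        pvFoldA_append rest _ _ (by
          intro q hq
          have : ((cs.map pvSing).take (max 0 (min p.1 (prev : Int))).toNat).length
              = (max 0 (min p.1 (prev : Int))).toNat := by
            simp; omega
          rw [this]; exact hqle q hq),
        pvJ_append, List.singleton_append, pvJ_cons, pvJ_sing]
      rw [ih _ (by omega) hrest hqle]
      simp [pvSpec, List.append_assoc]

-- B's fold agrees with pvSpec (plus whatever is already in parts)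
lemma pvFoldB_spec (text : String) (L : List (Int × String)) (parts : List String) (prevI : Int)
    (h0 : 0 ≤ prevI) (h1 : prevI ≤ (text.toList.length : Int))
    (hs : L.Pairwise (fun a b => b.1 ≤ a.1))
    (hle : ∀ p ∈ L, p.1 ≤ prevI) :
    pvJ (((L.foldl (pvStepB text) (parts, prevI)).1
        ++ [PySem.Str.slice text none (some (L.foldl (pvStepB text) (parts, prevI)).2)]).reverse)
      = pvSpec text.toList prevI.toNat L ++ pvJ parts.reverse := by
  induction L generalizing parts prevI with
  | nil =>
      simp only [List.foldl_nil, pvSpec, List.reverse_append, List.reverse_cons, List.reverse_nil,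
        List.nil_append, List.singleton_append]
      rw [pvJ_cons]
      congr 1
      show (PySem.Str.slice text none (some prevI)).toList = _
      simp [PySem.Str.slice, PySem.Chars.slice]
      rw [PySem.List.slice_to _ h0]
  | cons p rest ih =>
      have hple := hle p (by simp)
      obtain ⟨hp, hrest⟩ := List.pairwise_cons.mp hs
      have hlen : PySem.Str.len text = (text.toList.length : Int) := rfl
      have hc0 : (0:Int) ≤ max 0 (min p.1 (PySem.Str.len text)) := by omega
      have hc1 : max 0 (min p.1 (PySem.Str.len text)) ≤ (text.toList.length : Int) := by
        rw [hlen] at *; omega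
      rw [List.foldl_cons]
      have hstepB : pvStepB text (parts, prevI) p
          = (parts ++ [PySem.Str.slice text (some (max 0 (min p.1 (PySem.Str.len text)))) (some prevI), p.2],
             max 0 (min p.1 (PySem.Str.len text))) := rfl
      rw [hstepB]
      rw [ih _ _ hc0 hc1 hrest (by
        intro q hq
        have h1 := hp q hq
        rw [hlen] at *
        omega)]
      simp only [pvSpec]
      have hc' : (max 0 (min p.1 ((prevI.toNat : Nat) : Int))).toNat
          = (max 0 (min p.1 (PySem.Str.len text))).toNat := by
        rw [hlen] at *
        omega
      rw [hc']
      simp only [List.reverse_append, List.reverse_cons, List.reverse_nil, List.nil_append,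
        List.cons_append]
      rw [pvJ_cons, pvJ_cons]
      have hslice : ∀ (a : Int), 0 ≤ a →
          (PySem.Str.slice text (some a) (some prevI)).toList
            = (text.toList.take prevI.toNat).drop a.toNat := by
        intro a ha
        simp [PySem.Str.slice, PySem.Chars.slice]
        rw [PySem.List.slice_toNat _ ha h0, List.drop_take]
      rw [hslice _ hc0]
      simp [List.append_assoc]

lemma pvJ_def (l : List String) : PySem.Chars.join [] (l.map String.toList) = pvJ l := rfl

lemma pv_toList_A (text : String) (inserts : List (Int × String)) (hne : ¬ inserts = []) :
    (insert_markers_py text inserts).toList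
      = pvJ ((PySem.List.sorted inserts (fun x => x.1) true).foldl pvStepA
          (text.toList.map pvSing)) := by
  simp only [insert_markers_py, if_neg hne, PySem.Str.toList_join]
  rw [show ("" : String).toList = [] from rfl, pvJ_def]

lemma pv_toList_B (text : String) (inserts : List (Int × String)) :
    (insert_markers_py_alt text inserts).toList
      = pvJ (((PySem.List.sorted inserts (fun x => x.1) true).foldl (pvStepB text)
            ([], PySem.Str.len text)).1
          ++ [PySem.Str.slice text none
              (some ((PySem.List.sorted inserts (fun x => x.1) true).foldl (pvStepB text)
                ([], PySem.Str.len text)).2)]).reverse := by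
  simp only [insert_markers_py_alt, PySem.Str.toList_join]
  rw [show ("" : String).toList = [] from rfl, pvJ_def]

-- a pairwise-descending list splits into its past-the-end prefix and the in-range rest
lemma pvSplit (n : Int) (L : List (Int × String)) (hs : L.Pairwise (fun a b => b.1 ≤ a.1)) :
    ∃ ov rest, L = ov ++ rest ∧ (∀ p ∈ ov, n < p.1) ∧ (∀ p ∈ rest, p.1 ≤ n) := by
  induction L with
  | nil => exact ⟨[], [], rfl, by simp, by simp⟩
  | cons p L' ih =>
      obtain ⟨hp, hL'⟩ := List.pairwise_cons.mp hs
      by_cases hpn : n < p.1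
      · obtain ⟨ov, rest, hsplit, hov, hrest⟩ := ih hL'
        refine ⟨p :: ov, rest, by rw [hsplit]; rfl, ?_, hrest⟩
        intro q hq
        rcases List.mem_cons.mp hq with h | h
        · exact h ▸ hpn
        · exact hov q h
      · refine ⟨[], p :: L', rfl, by simp, ?_⟩
        intro q hq
        rcases List.mem_cons.mp hq with h | h
        · subst h; omega
        · have := hp q h; omega

-- A's loop on the past-the-end prefix: each step re-inserts its snippet somewhere in the tail
lemma pvFoldA_over (cs : List Char) (ov : List (Int × String)) (h : String)
    (hgt : ∀ p ∈ ov, (cs.length : Int) < p.1) (hh : ∀ p ∈ ov, p.2 = h ∨ p.2 = "")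
    (t : List String) (hbt : ∀ s ∈ t, s = h ∨ s = "") :
    ∃ t', ov.foldl pvStepA (cs.map pvSing ++ t) = cs.map pvSing ++ t'
      ∧ (∀ s ∈ t', s = h ∨ s = "")
      ∧ t'.countP (fun s => !(s == "")) =
          t.countP (fun s => !(s == "")) + (ov.map Prod.snd).countP (fun s => !(s == "")) := by
  induction ov generalizing t with
  | nil => exact ⟨t, by simp, hbt, by simp⟩
  | cons p ov' ih =>
      have hp := hgt p (by simp)
      obtain ⟨c, hstep, hcn⟩ : ∃ c : Nat,
          pvStepA (cs.map pvSing ++ t) p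
            = cs.map pvSing ++ (t.take c ++ [p.2] ++ t.drop c) ∧ c ≤ t.length := by
        refine ⟨(max 0 (min p.1 ((cs.length + t.length : Nat) : Int))).toNat - cs.length, ?_, by omega⟩
        unfold pvStepA
        simp only [List.length_append, List.length_map]
        have hc1 : cs.length ≤ (max 0 (min p.1 ((cs.length + t.length : Nat) : Int))).toNat := by
          push_cast; omega
        rw [List.take_append, List.drop_append,
          List.take_of_length_le (by simpa using hc1),
          List.drop_eq_nil_of_le (by simpa using hc1)]
        simp [List.append_assoc, List.length_map]
      rw [List.foldl_cons, hstep]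
      obtain ⟨t', heq, hbt', hcnt⟩ := ih
        (by intro q hq; exact hgt q (by simp [hq]))
        (by intro q hq; exact hh q (by simp [hq]))
        (t.take c ++ [p.2] ++ t.drop c)
        (by
          intro s hs
          rcases List.mem_append.mp hs with hs | hs
          · rcases List.mem_append.mp hs with hs | hs
            · exact hbt s (List.mem_of_mem_take hs)
            · rw [List.mem_singleton.mp hs]; exact hh p (by simp)
          · exact hbt s (List.mem_of_mem_drop hs))
      refine ⟨t', heq, hbt', ?_⟩
      rw [hcnt, List.map_cons, List.countP_cons]
      have hsplit := congrArg (List.countP (fun s => !(s == ""))) (List.take_append_drop c t)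
      rw [List.countP_append] at hsplit
      rw [List.countP_append, List.countP_append, List.countP_singleton]
      omega

-- the parts B's loop pushes for the past-the-end prefix: an empty segment and the snippet each
def pvTailB (s : String) : List (Int × String) → List String
  | [] => []
  | p :: r => s :: p.2 :: pvTailB s r

lemma mem_pvTailB (s x : String) (ov : List (Int × String)) (hx : x ∈ pvTailB s ov) :
    x = s ∨ ∃ p ∈ ov, x = p.2 := by
  induction ov with
  | nil => cases hx
  | cons p r ih =>
      rcases List.mem_cons.mp hx with h | hx'
      · exact Or.inl h
      · rcases List.mem_cons.mp hx' with h | hx''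
        · exact Or.inr ⟨p, by simp, h⟩
        · rcases ih hx'' with h | ⟨q, hq, hxe⟩
          · exact Or.inl h
          · exact Or.inr ⟨q, by simp [hq], hxe⟩

lemma countP_pvTailB (ov : List (Int × String)) :
    (pvTailB "" ov).countP (fun s => !(s == ""))
      = (ov.map Prod.snd).countP (fun s => !(s == "")) := by
  induction ov with
  | nil => rfl
  | cons p r ih => simp [pvTailB, List.countP_cons, ih]

lemma pvFoldB_over (text : String) (ov : List (Int × String))
    (hgt : ∀ p ∈ ov, (text.toList.length : Int) < p.1) (parts : List String) :
    ov.foldl (pvStepB text) (parts, PySem.Str.len text)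
      = (parts ++ pvTailB (PySem.Str.slice text (some (PySem.Str.len text))
            (some (PySem.Str.len text))) ov,
         PySem.Str.len text) := by
  induction ov generalizing parts with
  | nil => simp [pvTailB]
  | cons p ov' ih =>
      have hlen : PySem.Str.len text = (text.toList.length : Int) := rfl
      have hstep : pvStepB text (parts, PySem.Str.len text) p
          = (parts ++ [PySem.Str.slice text (some (PySem.Str.len text))
              (some (PySem.Str.len text)), p.2],
             PySem.Str.len text) := by
        unfold pvStepB
        have hm : max 0 (min p.1 (PySem.Str.len text)) = PySem.Str.len text := by
          have := hgt p (by simp)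
          rw [hlen] at *
          omega
        rw [hm]
      rw [List.foldl_cons, hstep, ih (by intro q hq; exact hgt q (by simp [hq]))]
      simp [pvTailB, List.append_assoc]

-- a list whose members are all h or "" joins to the corresponding copies of h
lemma pvJ_binary (h : String) (t : List String) (hbt : ∀ s ∈ t, s = h ∨ s = "") :
    pvJ t = pvJ (List.replicate (t.countP (fun s => !(s == ""))) h) := by
  induction t with
  | nil => rfl
  | cons s t ih =>
      have iht := ih (by intro x hx; exact hbt x (by simp [hx]))
      by_cases hse : s = ""
      · subst hse
        rw [pvJ_cons, List.countP_cons]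
        simpa using iht
      · have hsh : s = h := (hbt s (by simp)).resolve_right hse
        subst hsh
        rw [pvJ_cons, List.countP_cons]
        simp [hse, iht, List.replicate_succ, pvJ_cons]

-- ===== VERDICT (by name: the statement is the Claim_ definition above) =====
theorem insert_markers_py_spec : Claim_equal_insert_markers_py := by
  intro text inserts _hdom hpre
  show insert_markers_py text inserts = insert_markers_py_alt text inserts
  refine String.toList_inj.mp ?_
  have hlen : PySem.Str.len text = (text.toList.length : Int) := rfl
  by_cases hne : inserts = []
  · subst hne
    rw [pv_toList_B]
    have hA : insert_markers_py text [] = text := by simp [insert_markers_py]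
    rw [hA]
    have hL : PySem.List.sorted ([] : List (Int × String)) (fun x => x.1) true = [] := rfl
    rw [hL]
    simp only [List.foldl_nil, List.nil_append, List.reverse_singleton]
    rw [pvJ_cons, pvJ_nil]
    have : (PySem.Str.slice text none (some (PySem.Str.len text))).toList = text.toList := by
      simp [PySem.Str.slice, PySem.Chars.slice, PySem.Str.len]
    rw [this]
    simp
  · rw [pv_toList_A text inserts hne, pv_toList_B]
    have hs : (PySem.List.sorted inserts (fun x => x.1) true).Pairwise (fun a b => b.1 ≤ a.1) :=
      PySem.List.sorted_pairwise_rev inserts (fun x => x.1)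
    obtain ⟨ov, rest, hsplit, hov, hrestle⟩ :=
      pvSplit (text.toList.length : Int) _ hs
    have hpair := hsplit ▸ hs
    have hrest : rest.Pairwise (fun a b => b.1 ≤ a.1) := (List.pairwise_append.mp hpair).2.1
    have hovmem : ∀ p ∈ ov, p ∈ inserts := by
      intro p hp
      have : p ∈ PySem.List.sorted inserts (fun x => x.1) true := by
        rw [hsplit]
        exact List.mem_append_left _ hp
      exact (PySem.List.mem_sorted inserts (fun x => x.1) true p).mp this
    -- the common non-empty snippet of the past-the-end prefix (if any)
    obtain ⟨h, hh⟩ : ∃ h, ∀ p ∈ ov, p.2 = h ∨ p.2 = "" := by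
      refine ⟨((ov.map Prod.snd).filter (fun s => !(s == ""))).headI, ?_⟩
      intro p hp
      by_cases hpe : p.2 = ""
      · exact Or.inr hpe
      · left
        have hmem : p.2 ∈ (ov.map Prod.snd).filter (fun s => !(s == "")) := by
          rw [List.mem_filter]
          exact ⟨List.mem_map.mpr ⟨p, hp, rfl⟩, by simp [hpe]⟩
        obtain ⟨hd, tl, hft⟩ : ∃ hd tl,
            (ov.map Prod.snd).filter (fun s => !(s == "")) = hd :: tl := by
          cases hft' : (ov.map Prod.snd).filter (fun s => !(s == "")) with
          | nil => rw [hft'] at hmem; cases hmem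
          | cons a l => exact ⟨a, l, rfl⟩
        have hhd : hd ∈ (ov.map Prod.snd).filter (fun s => !(s == "")) := by
          rw [hft]; simp
        rw [List.mem_filter] at hhd
        obtain ⟨q, hq, hq2⟩ := List.mem_map.mp hhd.1
        have hqne : q.2 ≠ "" := by
          intro he
          rw [← hq2, he] at hhd
          simpa using hhd.2
        unfold Pre_insert_markers_py at hpre
        rw [hft, List.headI]
        rw [← hq2]
        exact hpre p (hovmem p hp) (hov p hp) hpe q (hovmem q hq) (hov q hq) hqne
    rw [hsplit, List.foldl_append, List.foldl_append]
    -- A side: the past-the-end prefix scatters its snippets (h or "") into the tail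
    obtain ⟨t', heq, hbt', hcnt⟩ := pvFoldA_over text.toList ov h hov hh [] (by simp)
    rw [show (List.map pvSing text.toList) = (List.map pvSing text.toList
        ++ ([] : List String)) from by simp]
    rw [heq,
      pvFoldA_append rest _ _ (by intro p hp; simpa using hrestle p hp),
      pvJ_append]
    rw [show (List.map pvSing text.toList) = (List.map pvSing text.toList).take
        text.toList.length from by simp]
    rw [pvFoldA_spec text.toList rest text.toList.length le_rfl hrest hrestle]
    -- B side: the same prefix pushes an empty segment and its snippet each time
    rw [pvFoldB_over text ov hov [],
      pvFoldB_spec text rest _ (PySem.Str.len text) (by rw [hlen]; positivity)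
        (le_of_eq hlen) hrest (by intro p hp; rw [hlen]; exact hrestle p hp)]
    have hsN : PySem.Str.slice text (some (PySem.Str.len text))
        (some (PySem.Str.len text)) = "" := by
      refine String.toList_inj.mp ?_
      simp [PySem.Str.slice, PySem.Chars.slice]
      rw [PySem.List.slice_toNat _ (by positivity) (by positivity)]
      simp
    rw [List.nil_append, hsN]
    -- both joins reduce to the same number of copies of h
    rw [pvJ_binary h t' hbt',
      pvJ_binary h (pvTailB "" ov).reverse (by
        intro x hx
        rcases mem_pvTailB "" x ov (List.mem_reverse.mp hx) with hxe | ⟨p, hp, hxe⟩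
        · exact Or.inr hxe
        · exact hxe ▸ hh p hp)]
    rw [List.countP_reverse, countP_pvTailB, hcnt]
    rw [hlen]
    simp
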